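-- pv_equiv track=rewrite | github.com/MrFletching/AdventOfCode2020 | 20/day_20_2.py | orient_image
-- ===== SOURCE A (Python) =====
-- def orient_image(rows, orientation):
--     size = len(rows)
--     oriented_rows = [[' '] * size for i in range(size)]
--     flipped = orientation // 4 == 1
--     rotation = orientation % 4
--
--     for y in range(size):
--         for x in range(size):
--
--             if rotation == 0:
--                 old_x = x
--                 old_y = y
--
--             elif rotation == 1:
--                 old_x = size - y - 1
--                 old_y = x
--
--             elif rotation == 2:
--                 old_x = size - x - 1
--                 old_y = size - y - 1
--
--             elif rotation == 3:
--                 old_x = y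
--                 old_y = size - x - 1
--
--             if flipped:
--                 old_x = size - old_x - 1
--
--             oriented_rows[y][x] = rows[old_y][old_x]
--
--     return oriented_rows
-- ===== SOURCE B (Python) =====
-- def orient_image(rows, orientation):
--     size = len(rows)
--     grid = [[row[i] for i in range(size)] for row in rows]
--     if orientation // 4 == 1:
--         grid = [row[::-1] for row in grid]
--     for _ in range(orientation % 4):
--         grid = [list(r) for r in zip(*grid)][::-1]
--     return grid
-- ===== Notes on version B (the rewrite author's own statement) =====
-- stated objective: simpler
-- what changed: Replaces A's per-cell source-coordinate arithmetic (nested loops over target cells with an if-chain on the rotation) by composed whole-grid operations: crop to the square, optionally mirror each row, then apply orientation%4 transpose-and-reverse 90-degree rotations.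
import Mathlib
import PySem

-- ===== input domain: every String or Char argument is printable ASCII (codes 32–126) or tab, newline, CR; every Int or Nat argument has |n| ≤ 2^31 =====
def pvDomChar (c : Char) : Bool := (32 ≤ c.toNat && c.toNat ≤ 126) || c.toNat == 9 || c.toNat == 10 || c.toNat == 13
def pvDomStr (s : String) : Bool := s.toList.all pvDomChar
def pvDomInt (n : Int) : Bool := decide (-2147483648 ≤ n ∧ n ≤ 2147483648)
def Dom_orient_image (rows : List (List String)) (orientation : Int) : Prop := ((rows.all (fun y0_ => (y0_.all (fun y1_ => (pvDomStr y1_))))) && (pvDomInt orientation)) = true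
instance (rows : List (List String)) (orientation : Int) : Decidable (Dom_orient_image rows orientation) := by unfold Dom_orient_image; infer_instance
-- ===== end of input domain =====

-- B replaces A's per-cell source-coordinate arithmetic by a mirror followed by
-- (orientation % 4) composed transpose-and-reverse 90° rotations (objective: simpler).

-- ===== PORT A =====
-- literal transliteration of A: the write-every-cell double loop is rendered as the
-- grid of the values written (each cell of oriented_rows is assigned exactly once)
def orient_image (rows : List (List String)) (orientation : Int) : List (List String) :=
  let size := rows.length
  let flipped := PySem.Int.floordiv orientation 4 = 1
  let rotation := PySem.Int.mod orientation 4
  (List.range size).map (fun (y : Nat) => (List.range size).map (fun (x : Nat) =>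
    let oxy : Int × Int :=
      if rotation = 0 then ((x : Int), (y : Int))
      else if rotation = 1 then ((size : Int) - (y : Int) - 1, (x : Int))
      else if rotation = 2 then ((size : Int) - (x : Int) - 1, (size : Int) - (y : Int) - 1)
      else ((y : Int), (size : Int) - (x : Int) - 1)
    let old_x : Int := if flipped then (size : Int) - oxy.1 - 1 else oxy.1
    PySem.List.pyGetD (PySem.List.pyGetD rows oxy.2 []) old_x " "))

-- ===== PORT B =====
-- zip(*g) : row i of the result collects entry i of every row; min row length many rows
def pyZipStar (g : List (List String)) : List (List String) :=
  match (g.map List.length).min? with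
  | none => []
  | some m => (List.range m).map (fun i => g.map (fun r => r.getD i " "))

-- one step 'grid = [list(r) for r in zip(*grid)][::-1]'
def rot90 (g : List (List String)) : List (List String) := (pyZipStar g).reverse

def orient_image_alt (rows : List (List String)) (orientation : Int) : List (List String) :=
  let size := rows.length
  let grid := rows.map (fun r => (List.range size).map (fun (i : Nat) => PySem.List.pyGetD r (i : Int) " "))
  let grid := if PySem.Int.floordiv orientation 4 = 1 then grid.map List.reverse else grid
  (List.range (PySem.Int.mod orientation 4).toNat).foldl (fun g _ => rot90 g) grid

-- ===== PRECONDITION & SPEC =====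
-- A indexes rows[old_y][old_x] for all old_x < len(rows): it raises IndexError
-- whenever some row is shorter than the row count, so exactly those inputs are excluded.
def Pre_orient_image (rows : List (List String)) (_orientation : Int) : Prop :=
  ∀ r ∈ rows, rows.length ≤ r.length
instance (rows : List (List String)) (orientation : Int) : Decidable (Pre_orient_image rows orientation) := by unfold Pre_orient_image; infer_instance

def pvWitness_orient_image : List (List String) × Int := ([["a", "b"], ["c", "d"]], 3)

def Spec_orient_image (rows : List (List String)) (orientation : Int) (out : List (List String)) : Prop := out = orient_image_alt rows orientation
instance (rows : List (List String)) (orientation : Int) (out : List (List String)) : Decidable (Spec_orient_image rows orientation out) := by unfold Spec_orient_image; infer_instance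

-- ===== CLAIM (what is proved, stated in full; the proofs are below) =====
def Claim_equal_orient_image : Prop := ∀ (rows : List (List String)) (orientation : Int), Dom_orient_image rows orientation → Pre_orient_image rows orientation → Spec_orient_image rows orientation (orient_image rows orientation)

-- ===== LEMMAS AND PROOFS =====

-- square grid of side n
def Sq (n : Nat) (g : List (List String)) : Prop := g.length = n ∧ ∀ r ∈ g, r.length = n

def cell (g : List (List String)) (y x : Nat) : String := (g.getD y []).getD x " "

theorem cell_eq {g : List (List String)} {y : Nat} (x : Nat) (hy : y < g.length) :
    cell g y x = (g[y]).getD x " " := by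
  unfold cell
  rw [List.getD_eq_getElem g [] hy]

theorem sq_ext {n : Nat} {g h : List (List String)} (hg : Sq n g) (hh : Sq n h)
    (hc : ∀ y < n, ∀ x < n, cell g y x = cell h y x) : g = h := by
  obtain ⟨hgl, hgr⟩ := hg
  obtain ⟨hhl, hhr⟩ := hh
  apply List.ext_getElem (by omega)
  intro y hy1 hy2
  have hrg : (g[y]).length = n := hgr _ (List.getElem_mem hy1)
  have hrh : (h[y]).length = n := hhr _ (List.getElem_mem hy2)
  apply List.ext_getElem (by omega)
  intro x hx1 hx2
  have := hc y (by omega) x (by omega)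
  rw [cell_eq x hy1, cell_eq x hy2] at this
  rwa [List.getD_eq_getElem _ _ hx1, List.getD_eq_getElem _ _ hx2] at this

theorem sq_grid {n : Nat} (F : Nat → Nat → String) :
    Sq n ((List.range n).map (fun y => (List.range n).map (F y))) := by
  constructor
  · simp
  · intro r hr
    simp only [List.mem_map, List.mem_range] at hr
    obtain ⟨y, _, rfl⟩ := hr
    simp

theorem cell_grid {n : Nat} (F : Nat → Nat → String) {y x : Nat} (hy : y < n) (hx : x < n) :
    cell ((List.range n).map (fun y => (List.range n).map (F y))) y x = F y x := by
  rw [cell_eq x (by simpa using hy)]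
  rw [List.getElem_map, List.getElem_range,
    List.getD_eq_getElem _ _ (by simpa using hx), List.getElem_map, List.getElem_range]

theorem sq_crop {rows : List (List String)} (hp : ∀ r ∈ rows, rows.length ≤ r.length) :
    Sq rows.length (rows.map (fun r => r.take rows.length)) := by
  constructor
  · simp
  · intro r hr
    simp only [List.mem_map] at hr
    obtain ⟨a, ha, rfl⟩ := hr
    simp [Nat.min_eq_left (hp a ha)]

theorem cell_crop {rows : List (List String)} {y x : Nat} (hy : y < rows.length) (hx : x < rows.length) :
    cell (rows.map (fun r => r.take rows.length)) y x = cell rows y x := by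
  rw [cell_eq x (by simpa using hy), cell_eq x hy]
  simp only [List.getElem_map]
  simp [List.getD_eq_getElem?_getD, List.getElem?_take_of_lt hx]

theorem sq_flip {n : Nat} {g : List (List String)} (hg : Sq n g) : Sq n (g.map List.reverse) := by
  obtain ⟨h1, h2⟩ := hg
  constructor
  · simpa
  · intro r hr
    simp only [List.mem_map] at hr
    obtain ⟨a, ha, rfl⟩ := hr
    simpa using h2 a ha

theorem cell_flip {n : Nat} {g : List (List String)} (hg : Sq n g) {y x : Nat} (hy : y < n) (hx : x < n) :
    cell (g.map List.reverse) y x = cell g y (n - 1 - x) := by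
  obtain ⟨h1, h2⟩ := hg
  rw [cell_eq x (by simpa [h1] using hy), cell_eq (n - 1 - x) (by omega)]
  have hlen : (g[y]'(by omega)).length = n := h2 _ (List.getElem_mem (by omega))
  simp only [List.getElem_map]
  rw [List.getD_eq_getElem _ _ (by simpa [hlen] using hx), List.getD_eq_getElem _ _ (by omega)]
  simp only [List.getElem_reverse]
  congr 1
  omega

theorem map_length_eq_replicate {n : Nat} {g : List (List String)} (hg : Sq n g) :
    g.map List.length = List.replicate n n := by
  obtain ⟨h1, h2⟩ := hg
  apply List.ext_getElem (by simpa)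
  intro i hi1 hi2
  simp [h2 _ (List.getElem_mem (by simpa using hi1))]

theorem min?_replicate_succ (n m : Nat) : (List.replicate (n + 1) m).min? = some m := by
  induction n with
  | zero => simp [List.min?]
  | succ k ih =>
    rw [List.replicate_succ] at ih ⊢
    rw [List.replicate_succ, List.min?_cons, List.min?_cons] at *
    simp_all

theorem pyZipStar_eq {n : Nat} {g : List (List String)} (hg : Sq n g) (hn : 0 < n) :
    pyZipStar g = (List.range n).map (fun i => g.map (fun r => r.getD i " ")) := by
  unfold pyZipStar
  rw [map_length_eq_replicate hg]
  obtain ⟨m, rfl⟩ : ∃ m, n = m + 1 := ⟨n - 1, by omega⟩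
  rw [min?_replicate_succ]

theorem sq_rot {n : Nat} {g : List (List String)} (hg : Sq n g) : Sq n (rot90 g) := by
  rcases Nat.eq_zero_or_pos n with h0 | hpos
  · subst h0
    have : g = [] := List.eq_nil_of_length_eq_zero hg.1
    subst this
    exact ⟨by simp [rot90, pyZipStar], by simp [rot90, pyZipStar]⟩
  · unfold rot90
    rw [pyZipStar_eq hg hpos]
    constructor
    · simp
    · intro r hr
      simp only [List.mem_reverse, List.mem_map, List.mem_range] at hr
      obtain ⟨i, _, rfl⟩ := hr
      simp [hg.1]

theorem cell_rot {n : Nat} {g : List (List String)} (hg : Sq n g) {y x : Nat} (hy : y < n) (hx : x < n) :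
    cell (rot90 g) y x = cell g x (n - 1 - y) := by
  obtain ⟨h1, h2⟩ := hg
  unfold rot90
  rw [pyZipStar_eq ⟨h1, h2⟩ (by omega)]
  rw [cell_eq x (by simpa using hy), cell_eq (n - 1 - y) (by omega)]
  rw [List.getElem_reverse]
  simp only [List.length_map, List.length_range]
  rw [List.getElem_map, List.getElem_range]
  rw [List.getD_eq_getElem _ _ (by rw [List.length_map]; omega), List.getElem_map]

-- A's source cell under Pre_: both Python index accesses land in range
theorem pyCell {rows : List (List String)} (hp : ∀ r ∈ rows, rows.length ≤ r.length)
    {oy ox : Int} (h1 : 0 ≤ oy) (h2 : oy < rows.length) (h3 : 0 ≤ ox) (h4 : ox < rows.length) :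
    PySem.List.pyGetD (PySem.List.pyGetD rows oy []) ox " " = cell rows oy.toNat ox.toNat := by
  rw [PySem.List.pyGetD_eq_getElem rows [] h1 h2]
  have hlen : (rows.length : Int) ≤ ((rows[oy.toNat]'(by omega)).length : Int) := by
    exact_mod_cast hp _ (List.getElem_mem (by omega))
  rw [PySem.List.pyGetD_eq_getElem _ " " h3 (by omega)]
  rw [cell_eq _ (by omega), List.getD_eq_getElem _ _ (by omega)]

-- under Pre_, B's indexing comprehension builds exactly the size-cropped rows
theorem crop_eq {rows : List (List String)} (hp : ∀ r ∈ rows, rows.length ≤ r.length) :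
    rows.map (fun r => (List.range rows.length).map (fun (i : Nat) => PySem.List.pyGetD r (i : Int) " "))
      = rows.map (fun r => r.take rows.length) := by
  apply List.map_congr_left
  intro r hr
  apply List.ext_getElem (by simp [Nat.min_eq_left (hp r hr)])
  intro i hi1 hi2
  simp only [List.length_map, List.length_range] at hi1
  rw [List.getElem_map, List.getElem_range,
    PySem.List.pyGetD_eq_getElem r " " (by omega) (by exact_mod_cast lt_of_lt_of_le (by exact_mod_cast hi1) (by exact_mod_cast hp r hr)),
    List.getElem_take]
  simp

theorem case_lemma {rows : List (List String)} (F : Nat → Nat → String)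
    {G : List (List String)} (hG : Sq rows.length G)
    (hc : ∀ y < rows.length, ∀ x < rows.length, F y x = cell G y x) :
    (List.range rows.length).map (fun y => (List.range rows.length).map (F y)) = G := by
  apply sq_ext (sq_grid F) hG
  intro y hy x hx
  rw [cell_grid F hy hx]
  exact hc y hy x hx

-- ===== VERDICT (by name: the statement is the Claim_ definition above) =====
theorem orient_image_spec : Claim_equal_orient_image := by
  intro rows o _hdom hpre
  show orient_image rows o = orient_image_alt rows o
  have hr0 : 0 ≤ PySem.Int.mod o 4 := PySem.Int.mod_nonneg o (by norm_num)
  have hr4 : PySem.Int.mod o 4 < 4 := PySem.Int.mod_lt o (by norm_num)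
  have s0 := sq_crop hpre
  have hcases : PySem.Int.mod o 4 = 0 ∨ PySem.Int.mod o 4 = 1 ∨ PySem.Int.mod o 4 = 2 ∨ PySem.Int.mod o 4 = 3 := by omega
  have s0f := sq_flip s0
  have e10 : ((1 : Int) = 0) = False := by norm_num
  have e20 : ((2 : Int) = 0) = False := by norm_num
  have e21 : ((2 : Int) = 1) = False := by norm_num
  have e30 : ((3 : Int) = 0) = False := by norm_num
  have e31 : ((3 : Int) = 1) = False := by norm_num
  have e32 : ((3 : Int) = 2) = False := by norm_num
  rcases hcases with hr | hr | hr | hr <;> by_cases hf : PySem.Int.floordiv o 4 = 1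
  · -- r = 0, flipped
    simp only [orient_image, orient_image_alt, hr, hf, if_true, Int.toNat_zero,
      List.range_zero, List.foldl_nil]
    rw [crop_eq hpre]
    apply case_lemma _ s0f
    intro y hy x hx
    rw [pyCell hpre (by omega) (by omega) (by omega) (by omega)]
    rw [cell_flip s0 hy hx, cell_crop hy (by omega)]
    congr 1 ; omega
  · -- r = 0, not flipped
    simp only [orient_image, orient_image_alt, hr, hf, if_true, if_false, Int.toNat_zero,
      List.range_zero, List.foldl_nil]
    rw [crop_eq hpre]
    apply case_lemma _ s0
    intro y hy x hx
    rw [pyCell hpre (by omega) (by omega) (by omega) (by omega)]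
    rw [cell_crop hy hx]
    simp
  · -- r = 1, flipped
    simp only [orient_image, orient_image_alt, hr, hf, e10, if_true, if_false, Int.toNat_one,
      List.range_one, List.foldl_cons, List.foldl_nil]
    rw [crop_eq hpre]
    apply case_lemma _ (sq_rot s0f)
    intro y hy x hx
    rw [pyCell hpre (by omega) (by omega) (by omega) (by omega)]
    rw [cell_rot s0f hy hx, cell_flip s0 hx (by omega), cell_crop hx (by omega)]
    congr 1 ; omega
  · -- r = 1, not flipped
    simp only [orient_image, orient_image_alt, hr, hf, e10, if_true, if_false, Int.toNat_one,
      List.range_one, List.foldl_cons, List.foldl_nil]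
    rw [crop_eq hpre]
    apply case_lemma _ (sq_rot s0)
    intro y hy x hx
    rw [pyCell hpre (by omega) (by omega) (by omega) (by omega)]
    rw [cell_rot s0 hy hx, cell_crop hx (by omega)]
    congr 1 ; omega
  · -- r = 2, flipped
    simp only [orient_image, orient_image_alt, hr, hf, if_true, if_false,
      e20, e21, show ((2 : Int)).toNat = 2 from rfl, List.range_succ, List.range_zero, List.nil_append,
      List.foldl_append, List.foldl_cons, List.foldl_nil]
    rw [crop_eq hpre]
    apply case_lemma _ (sq_rot (sq_rot s0f))
    intro y hy x hx
    rw [pyCell hpre (by omega) (by omega) (by omega) (by omega)]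
    rw [cell_rot (sq_rot s0f) hy hx, cell_rot s0f hx (by omega),
      cell_flip s0 (by omega) (by omega), cell_crop (by omega) (by omega)]
    congr 1 <;> omega
  · -- r = 2, not flipped
    simp only [orient_image, orient_image_alt, hr, hf, if_true, if_false,
      e20, e21, show ((2 : Int)).toNat = 2 from rfl, List.range_succ, List.range_zero, List.nil_append,
      List.foldl_append, List.foldl_cons, List.foldl_nil]
    rw [crop_eq hpre]
    apply case_lemma _ (sq_rot (sq_rot s0))
    intro y hy x hx
    rw [pyCell hpre (by omega) (by omega) (by omega) (by omega)]
    rw [cell_rot (sq_rot s0) hy hx, cell_rot s0 hx (by omega), cell_crop (by omega) (by omega)]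
    congr 1 <;> omega
  · -- r = 3, flipped
    simp only [orient_image, orient_image_alt, hr, hf, if_true, if_false,
      e30, e31, e32, show ((3 : Int)).toNat = 3 from rfl, List.range_succ, List.range_zero, List.nil_append,
      List.foldl_append, List.foldl_cons, List.foldl_nil]
    rw [crop_eq hpre]
    apply case_lemma _ (sq_rot (sq_rot (sq_rot s0f)))
    intro y hy x hx
    rw [pyCell hpre (by omega) (by omega) (by omega) (by omega)]
    rw [cell_rot (sq_rot (sq_rot s0f)) hy hx, cell_rot (sq_rot s0f) hx (by omega),
      cell_rot s0f (by omega) (by omega), cell_flip s0 (by omega) (by omega),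
      cell_crop (by omega) (by omega)]
    congr 1 <;> omega
  · -- r = 3, not flipped
    simp only [orient_image, orient_image_alt, hr, hf, if_false,
      e30, e31, e32, show ((3 : Int)).toNat = 3 from rfl, List.range_succ, List.range_zero, List.nil_append,
      List.foldl_append, List.foldl_cons, List.foldl_nil]
    rw [crop_eq hpre]
    apply case_lemma _ (sq_rot (sq_rot (sq_rot s0)))
    intro y hy x hx
    rw [pyCell hpre (by omega) (by omega) (by omega) (by omega)]
    rw [cell_rot (sq_rot (sq_rot s0)) hy hx, cell_rot (sq_rot s0) hx (by omega),
      cell_rot s0 (by omega) (by omega), cell_crop (by omega) (by omega)]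
    congr 1 <;> omega
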